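-- pv_equiv track=rewrite | github.com/lia-git/prod | every.py | check
-- ===== SOURCE A (Python) =====
-- def check(lst):
--     ls_ = lst.split(",")
--     ls = []
--     for ix,s in enumerate(ls_):
--         if ls:
--             if s != ls[-1]:
--                 ls.append(s)
--         else:
--             ls.append(s)
--         if ix == len(ls_) -33:
--             ls.append("#")
--     return ",".join(ls)
-- ===== SOURCE B (Python) =====
-- def _dedup(ts):
--     """Collapse runs of consecutive equal tokens (keep the first of each run)."""
--     return ts[:1] + [b for a, b in zip(ts, ts[1:]) if b != a]
--
--
-- def check(lst):
--     ts = lst.split(",")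
--     if len(ts) < 33:
--         return ",".join(_dedup(ts))
--     cut = len(ts) - 32
--     return ",".join(_dedup(ts[:cut]) + _dedup(["#"] + ts[cut:]))
-- ===== Notes on version B (the rewrite author's own statement) =====
-- stated objective: simpler
-- what changed: Replaces A's single loop that injects the marker token mid-iteration with a split at len-32 plus a reusable pairwise-zip dedup helper applied to each segment (the marker prepended to the tail segment).
import Mathlib
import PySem

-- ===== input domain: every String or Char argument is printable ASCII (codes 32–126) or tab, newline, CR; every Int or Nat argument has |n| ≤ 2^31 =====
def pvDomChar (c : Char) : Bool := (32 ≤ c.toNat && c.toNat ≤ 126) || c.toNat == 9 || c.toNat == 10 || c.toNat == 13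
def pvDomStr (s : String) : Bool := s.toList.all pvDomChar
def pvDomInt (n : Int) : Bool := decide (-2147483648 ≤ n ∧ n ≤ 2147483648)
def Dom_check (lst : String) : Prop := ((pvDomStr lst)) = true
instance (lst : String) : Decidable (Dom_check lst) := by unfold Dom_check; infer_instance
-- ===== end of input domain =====

-- B re-decomposes A's single marker-injecting loop as: split at len-32, collapse consecutive
-- duplicates of each part (pairwise zip), with the marker prepended to the tail part — objective: simpler.

-- ===== PORT A =====
-- one step of A's for-loop: maybe-append the token, then maybe-append the "#" marker
def stepA (n : Int) (ls : List String) (p : Int × String) : List String :=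
  let ls := if !ls.isEmpty then (if p.2 ≠ ls.getLast! then ls ++ [p.2] else ls)
            else ls ++ [p.2]
  if p.1 = n - 33 then ls ++ ["#"] else ls

def check (lst : String) : String :=
  let ls_ := (PySem.Str.split? lst ",").getD []
  PySem.Str.join "," ((PySem.List.enumerate ls_ 0).foldl (stepA (ls_.length : Int)) [])

-- ===== PORT B =====
-- Source B's _dedup: ts[:1] + [b for a, b in zip(ts, ts[1:]) if b != a]
def dedupZ (ts : List String) : List String :=
  PySem.List.slice ts none (some 1) ++
    (((ts.zip (PySem.List.slice ts (some 1) none)).filter (fun p => p.2 != p.1)).map Prod.snd)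

def check_alt (lst : String) : String :=
  let ts := (PySem.Str.split? lst ",").getD []
  if ts.length < 33 then PySem.Str.join "," (dedupZ ts)
  else
    let cut : Int := (ts.length : Int) - 32
    PySem.Str.join "," (dedupZ (PySem.List.slice ts none (some cut)) ++
                        dedupZ (["#"] ++ PySem.List.slice ts (some cut) none))

-- ===== PRECONDITION & SPEC =====
def Spec_check (lst : String) (out : String) : Prop := out = check_alt lst
instance (lst : String) (out : String) : Decidable (Spec_check lst out) := by unfold Spec_check; infer_instance

-- ===== CLAIM (what is proved, stated in full; the proofs are below) =====
def Claim_equal_check : Prop := ∀ (lst : String), Dom_check lst → Spec_check lst (check lst)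

-- ===== LEMMAS AND PROOFS =====

-- consecutive-duplicate collapse of a list, given the previous kept token (none = nothing yet)
def dedupO : List String → Option String → List String
  | [], _ => []
  | s :: r, o => if o = some s then dedupO r o else s :: dedupO r (some s)

theorem dedupO_single (s : String) (o : Option String) :
    dedupO [s] o = if o = some s then [] else [s] := by
  by_cases h : o = some s <;> simp [dedupO, h]

theorem dedupO_cons (s : String) (r : List String) (o : Option String) :
    dedupO (s :: r) o = dedupO [s] o ++ dedupO r (if o = some s then o else some s) := by
  by_cases h : o = some s
  · simp [dedupO, dedupO_single, h]
  · simp [dedupO, dedupO_single, h]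

theorem getLast?_append_dedupO_single (acc : List String) (s : String) :
    (acc ++ dedupO [s] acc.getLast?).getLast? =
      (if acc.getLast? = some s then acc.getLast? else some s) := by
  by_cases h : acc.getLast? = some s <;> simp [dedupO_single, h]

theorem zipFilter_eq_dedupO (l : List String) (a : String) :
    ((((a :: l).zip l).filter (fun p => p.2 != p.1)).map Prod.snd) = dedupO l (some a) := by
  induction l generalizing a with
  | nil => simp [dedupO]
  | cons b r ih =>
      have hz : (a :: b :: r).zip (b :: r) = (a, b) :: ((b :: r).zip r) := rfl
      rw [hz]
      by_cases h : b = a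
      · subst h; simp [dedupO, ih]
      · simp [dedupO, h, Ne.symm h, ih]

theorem dedupZ_eq_dedupO (l : List String) : dedupZ l = dedupO l none := by
  cases l with
  | nil => simp [dedupZ, dedupO, PySem.List.slice]
  | cons a r =>
      have h1 : PySem.List.slice (a :: r) none (some 1) = [a] := by
        rw [show (1 : Int) = ((1 : Nat) : Int) by norm_num, PySem.List.slice_to_natCast]
        simp
      have h2 : PySem.List.slice (a :: r) (some 1) none = r := by
        rw [PySem.List.slice_from_one]; rfl
      simp [dedupZ, h1, h2, zipFilter_eq_dedupO, dedupO]

theorem getLast?_cons_eq (a : String) (t : List String) :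
    (a :: t).getLast? = some ((a :: t).getLast!) := by
  cases h : (a :: t).getLast? with
  | none => simp at h
  | some x => rw [List.getLast!_eq_getLast?_getD, h]; rfl

theorem stepA_no_marker (n k : Int) (s : String) (acc : List String) (hm : k ≠ n - 33) :
    stepA n acc (k, s) = acc ++ dedupO [s] acc.getLast? := by
  cases acc with
  | nil => simp [stepA, hm, dedupO_single]
  | cons a t =>
      rw [getLast?_cons_eq]
      by_cases hs : s = (a :: t).getLast?.getD ""
      · simp [stepA, hm, hs, dedupO_single, List.getLast!_eq_getLast?_getD]
      · simp [stepA, hm, hs, dedupO_single, Ne.symm hs, List.getLast!_eq_getLast?_getD]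

theorem stepA_marker (n k : Int) (s : String) (acc : List String) (hm : k = n - 33) :
    stepA n acc (k, s) = (acc ++ dedupO [s] acc.getLast?) ++ ["#"] := by
  cases acc with
  | nil => simp [stepA, hm, dedupO_single]
  | cons a t =>
      rw [getLast?_cons_eq]
      by_cases hs : s = (a :: t).getLast?.getD ""
      · simp [stepA, hm, hs, dedupO_single, List.getLast!_eq_getLast?_getD]
      · simp [stepA, hm, hs, dedupO_single, Ne.symm hs, List.getLast!_eq_getLast?_getD]

-- A's loop over indices that never hit the marker index n-33
theorem foldl_stepA_no_marker (n : Int) (seg : List String) (k : Int) (acc : List String)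
    (hk : n - 33 < k) :
    (PySem.List.enumerate seg k).foldl (stepA n) acc = acc ++ dedupO seg acc.getLast? := by
  induction seg generalizing k acc with
  | nil => simp [PySem.List.enumerate_nil, dedupO]
  | cons s r ih =>
      rw [PySem.List.enumerate_cons, List.foldl_cons,
        stepA_no_marker n k s acc (by omega), ih (k + 1) _ (by omega),
        getLast?_append_dedupO_single]
      conv_rhs => rw [dedupO_cons]
      simp [List.append_assoc]

-- A's loop over a segment whose LAST index is exactly the marker index n-33
theorem foldl_stepA_marker (n : Int) (seg : List String) (k : Int) (acc : List String)
    (hne : seg ≠ []) (hk : k + seg.length = n - 32) :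
    (PySem.List.enumerate seg k).foldl (stepA n) acc = acc ++ dedupO seg acc.getLast? ++ ["#"] := by
  induction seg generalizing k acc with
  | nil => exact absurd rfl hne
  | cons s r ih =>
      cases r with
      | nil =>
          rw [PySem.List.enumerate_cons, PySem.List.enumerate_nil, List.foldl_cons, List.foldl_nil,
            stepA_marker n k s acc (by simp at hk; omega)]
      | cons b r' =>
          rw [PySem.List.enumerate_cons, List.foldl_cons,
            stepA_no_marker n k s acc (by simp at hk ⊢; omega),
            ih (k + 1) _ (by simp) (by simp at hk ⊢; omega),
            getLast?_append_dedupO_single]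
          conv_rhs => rw [dedupO_cons]
          simp [List.append_assoc]

theorem check_eq_alt_core (ts : List String) :
    (PySem.List.enumerate ts 0).foldl (stepA (ts.length : Int)) [] =
      (if ts.length < 33 then dedupZ ts
       else dedupZ (PySem.List.slice ts none (some ((ts.length : Int) - 32))) ++
            dedupZ (["#"] ++ PySem.List.slice ts (some ((ts.length : Int) - 32)) none)) := by
  by_cases h : ts.length < 33
  · rw [if_pos h, dedupZ_eq_dedupO,
      foldl_stepA_no_marker (ts.length : Int) ts 0 [] (by push_cast; omega)]
    simp
  · rw [if_neg h]
    have hc : ((ts.length : Int) - 32) = ((ts.length - 32 : Nat) : Int) := by push_cast; omega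
    have hlen : (ts.take (ts.length - 32)).length = ts.length - 32 := by
      rw [List.length_take]; omega
    have hne1 : ts.take (ts.length - 32) ≠ [] := by
      intro hcon; rw [hcon] at hlen; simp at hlen; omega
    rw [hc, PySem.List.slice_to_natCast, PySem.List.slice_from_natCast,
      show PySem.List.enumerate ts 0 =
        PySem.List.enumerate (ts.take (ts.length - 32)) 0 ++
          PySem.List.enumerate (ts.drop (ts.length - 32)) (0 + (ts.take (ts.length - 32)).length)
        from by rw [← PySem.List.enumerate_append, List.take_append_drop],
      List.foldl_append,
      foldl_stepA_marker (ts.length : Int) _ 0 []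
        hne1 (by simp [hlen]; push_cast; omega),
      foldl_stepA_no_marker (ts.length : Int) _ _ _ (by simp [hlen]; push_cast; omega),
      dedupZ_eq_dedupO, dedupZ_eq_dedupO]
    simp [dedupO]

-- ===== VERDICT (by name: the statement is the Claim_ definition above) =====
theorem check_spec : Claim_equal_check := by
  intro lst _
  simp only [Spec_check, check, check_alt]
  rw [check_eq_alt_core]
  split <;> rfl
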